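-- pv_equiv track=rewrite | github.com/AnPrudentia/Am-s-Engine-List | to add/need code/harm_minimizer_filter.py | recommend_rewrite
-- ===== SOURCE A (Python) =====
-- def recommend_rewrite(input_text: str) -> str:
--     """Provides a soft neutralization of identified harm terms."""
--     replacements = {
--         "violence": "conflict",
--         "abuse": "mistreatment",
--         "manipulation": "influence",
--         "trauma": "distress",
--         "bullying": "peer pressure",
--         "doxxing": "privacy violation",
--         "harassment": "persistent contact"
--     }
--     output = input_text
--     for word, replacement in replacements.items():
--         output = output.replace(word, replacement)
--     return output
-- ===== SOURCE B (Python) =====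
-- def recommend_rewrite(input_text: str) -> str:
--     """Provides a soft neutralization of identified harm terms."""
--     replacements = [
--         ("violence", "conflict"),
--         ("abuse", "mistreatment"),
--         ("manipulation", "influence"),
--         ("trauma", "distress"),
--         ("bullying", "peer pressure"),
--         ("doxxing", "privacy violation"),
--         ("harassment", "persistent contact"),
--     ]
--
--     def soften(text, pairs):
--         if not pairs:
--             return text
--         word, replacement = pairs[0]
--         return soften(replacement.join(text.split(word)), pairs[1:])
--
--     return soften(input_text, replacements)
-- ===== Notes on version B (the rewrite author's own statement) =====
-- stated objective: alternative
-- what changed: Each sequential str.replace pass is re-expressed as split-on-the-term followed by join-with-the-softer-synonym, and the loop over the replacement table becomes a recursion over the pair list; the equivalence rests on the proved identity replace(s, old, new) = new.join(s.split(old)) for nonempty old.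
import Mathlib
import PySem

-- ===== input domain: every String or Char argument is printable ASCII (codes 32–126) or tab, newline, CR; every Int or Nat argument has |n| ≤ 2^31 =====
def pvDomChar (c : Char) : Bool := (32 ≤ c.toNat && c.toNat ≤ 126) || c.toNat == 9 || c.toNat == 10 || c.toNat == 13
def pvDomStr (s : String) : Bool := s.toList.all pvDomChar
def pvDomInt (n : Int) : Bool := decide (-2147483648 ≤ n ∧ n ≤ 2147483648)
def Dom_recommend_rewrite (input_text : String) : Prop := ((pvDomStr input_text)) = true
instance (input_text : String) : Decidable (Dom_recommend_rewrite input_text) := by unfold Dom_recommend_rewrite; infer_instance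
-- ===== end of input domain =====

-- B re-expresses each sequential replace pass as split-on-the-term + join-with-the-synonym,
-- recursing over the replacement list instead of A's loop of str.replace calls (alternative
-- decomposition, same cost); equal to A on all inputs.


-- ===== PORT A =====
-- the dict literal: seven distinct literal keys, so the insertion-order assoc list is exactly this list
def recommend_rewrite (input_text : String) : String :=
  let replacements : PySem.Dict String String :=
    ⟨[("violence", "conflict"), ("abuse", "mistreatment"), ("manipulation", "influence"),
      ("trauma", "distress"), ("bullying", "peer pressure"), ("doxxing", "privacy violation"),
      ("harassment", "persistent contact")]⟩
  replacements.items.foldl (fun output wr => PySem.Str.replace output wr.1 wr.2) input_text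

-- ===== PORT B =====
-- text.split(word) is PySem.Str.split?; the .getD default only totalizes the call (Python raises
-- on an empty separator; every word below is a nonempty literal, so the default is never used)
def rrSoften (text : String) (pairs : List (String × String)) : String :=
  match pairs with
  | [] => text
  | (word, replacement) :: rest =>
      rrSoften (PySem.Str.join replacement ((PySem.Str.split? text word).getD [text])) rest

def recommend_rewrite_alt (input_text : String) : String :=
  rrSoften input_text
    [("violence", "conflict"), ("abuse", "mistreatment"), ("manipulation", "influence"),
     ("trauma", "distress"), ("bullying", "peer pressure"), ("doxxing", "privacy violation"),
     ("harassment", "persistent contact")]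

-- ===== PRECONDITION & SPEC =====
def Spec_recommend_rewrite (input_text : String) (out : String) : Prop := out = recommend_rewrite_alt input_text
instance (input_text : String) (out : String) : Decidable (Spec_recommend_rewrite input_text out) := by unfold Spec_recommend_rewrite; infer_instance

-- ===== CLAIM (what is proved, stated in full; the proofs are below) =====
def Claim_equal_recommend_rewrite : Prop := ∀ (input_text : String), Dom_recommend_rewrite input_text → Spec_recommend_rewrite input_text (recommend_rewrite input_text)

-- ===== LEMMAS AND PROOFS =====

-- head-modification view of splitOn.go's accumulators
def prependHead (x : List Char) : List (List Char) → List (List Char)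
  | [] => [x]
  | p :: ps => (x ++ p) :: ps

theorem prependHead_prependHead (x y : List Char) (G : List (List Char)) :
    prependHead x (prependHead y G) = prependHead (x ++ y) G := by
  cases G <;> simp [prependHead]

theorem splitOn_go_eq (sep : List Char) (fuel : Nat) (l cur : List Char)
    (acc : List (List Char)) :
    PySem.Chars.splitOn.go sep fuel l cur acc
      = acc.reverse ++ prependHead cur.reverse (PySem.Chars.splitOn.go sep fuel l [] []) := by
  induction fuel generalizing l cur acc with
  | zero => simp [PySem.Chars.splitOn.go, prependHead]
  | succ f ih =>
    cases l with
    | nil => simp [PySem.Chars.splitOn.go, prependHead]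
    | cons c rest =>
      rw [PySem.Chars.splitOn.go]
      conv_rhs => rw [PySem.Chars.splitOn.go]
      simp only [List.reverse_nil]
      by_cases h : sep.isPrefixOf (c :: rest) = true
      · simp only [h, if_true]
        rw [ih _ [] (cur.reverse :: acc), ih _ [] [[]]]
        simp [prependHead]
      · simp only [h]
        rw [ih _ (c :: cur) acc, ih _ [c] []]
        simp [prependHead_prependHead]

theorem splitOn_go_ne_nil (sep : List Char) (fuel : Nat) (l cur : List Char)
    (acc : List (List Char)) :
    PySem.Chars.splitOn.go sep fuel l cur acc ≠ [] := by
  induction fuel generalizing l cur acc with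
  | zero => simp [PySem.Chars.splitOn.go]
  | succ f ih =>
    cases l with
    | nil => simp [PySem.Chars.splitOn.go]
    | cons c rest =>
      rw [PySem.Chars.splitOn.go]
      by_cases h : sep.isPrefixOf (c :: rest) = true
      · simp only [h, if_true]; exact ih _ _ _
      · simp only [h]; exact ih _ _ _

theorem intercalate_prependHead (new x : List Char) (G : List (List Char)) :
    List.intercalate new (prependHead x G) = x ++ List.intercalate new G := by
  cases G with
  | nil => simp [prependHead, List.intercalate]
  | cons p ps =>
    simp only [prependHead]
    cases ps <;> simp [List.intercalate, List.intersperse]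

theorem replace_go_eq (sep new : List Char) (fuel : Nat) (l acc : List Char) :
    PySem.Chars.replace.go sep new fuel l acc
      = acc.reverse ++ List.intercalate new (PySem.Chars.splitOn.go sep fuel l [] []) := by
  induction fuel generalizing l acc with
  | zero => simp [PySem.Chars.replace.go, PySem.Chars.splitOn.go, List.intercalate]
  | succ f ih =>
    cases l with
    | nil => simp [PySem.Chars.replace.go, PySem.Chars.splitOn.go, List.intercalate]
    | cons c rest =>
      rw [PySem.Chars.replace.go]
      conv_rhs => rw [PySem.Chars.splitOn.go]
      simp only [List.reverse_nil]
      by_cases h : sep.isPrefixOf (c :: rest) = true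
      · simp only [h, if_true]
        rw [ih (List.drop sep.length (c :: rest)) (new.reverse ++ acc),
            splitOn_go_eq sep f (List.drop sep.length (c :: rest)) [] [[]]]
        have hne := splitOn_go_ne_nil sep f (List.drop sep.length (c :: rest)) [] []
        cases hG : PySem.Chars.splitOn.go sep f (List.drop sep.length (c :: rest)) [] [] with
        | nil => exact absurd hG hne
        | cons p ps =>
          simp [prependHead, List.intercalate]
      · simp only [h]
        rw [ih rest (c :: acc), splitOn_go_eq sep f rest [c] []]
        simp [intercalate_prependHead]

theorem splitOn_go_fuel (sep : List Char) (hsep : sep ≠ []) (f1 : Nat) :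
    ∀ (f2 : Nat) (l cur : List Char) (acc : List (List Char)),
      l.length ≤ f1 → l.length ≤ f2 →
      PySem.Chars.splitOn.go sep f1 l cur acc = PySem.Chars.splitOn.go sep f2 l cur acc := by
  induction f1 with
  | zero =>
    intro f2 l cur acc h1 h2
    have hl : l = [] := by cases l <;> simp_all
    subst hl
    cases f2 <;> simp [PySem.Chars.splitOn.go]
  | succ g1 ih =>
    intro f2 l cur acc h1 h2
    cases l with
    | nil => cases f2 <;> simp [PySem.Chars.splitOn.go]
    | cons c rest =>
      cases f2 with
      | zero => simp at h2
      | succ g2 =>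
        rw [PySem.Chars.splitOn.go]
        conv_rhs => rw [PySem.Chars.splitOn.go]
        have hsl : 1 ≤ sep.length := by cases sep <;> simp_all
        by_cases h : sep.isPrefixOf (c :: rest) = true
        · simp only [h, if_true]
          apply ih <;> simp only [List.length_drop, List.length_cons] at h1 h2 ⊢ <;> omega
        · simp only [h]
          apply ih <;> simp at h1 h2 ⊢ <;> omega

theorem chars_replace_eq_join_splitOn (s sep new : List Char) (hsep : sep ≠ []) :
    PySem.Chars.replace s sep new = PySem.Chars.join new (PySem.Chars.splitOn s sep) := by
  rw [PySem.Chars.replace, PySem.Chars.splitOn, PySem.Chars.join]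
  have hne : sep.isEmpty = false := by cases sep <;> simp_all
  rw [hne]
  simp only [Bool.false_eq_true, if_false]
  rw [replace_go_eq, splitOn_go_fuel sep hsep s.length (s.length + 1) s [] [] (le_refl _) (by omega)]
  simp

theorem str_replace_eq (t w r : String) (hw : w.toList ≠ []) :
    PySem.Str.replace t w r = PySem.Str.join r ((PySem.Str.split? t w).getD [t]) := by
  rw [PySem.Str.replace, PySem.Str.split?, PySem.Chars.split?]
  have hne : w.toList.isEmpty = false := by cases h : w.toList <;> simp_all
  rw [hne]
  simp only [Bool.false_eq_true, if_false, Option.map_some, Option.getD_some]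
  rw [PySem.Str.join]
  rw [chars_replace_eq_join_splitOn _ _ _ hw]
  congr 1
  simp [Function.comp_def]

theorem foldl_replace_eq_soften (pairs : List (String × String)) :
    ∀ t : String, (∀ p ∈ pairs, p.1.toList ≠ []) →
      pairs.foldl (fun output wr => PySem.Str.replace output wr.1 wr.2) t = rrSoften t pairs := by
  induction pairs with
  | nil => intro t _; rfl
  | cons p rest ih =>
    intro t h
    obtain ⟨w, r⟩ := p
    rw [List.foldl_cons, rrSoften]
    rw [str_replace_eq t w r (h (w, r) (by simp))]
    exact ih _ (fun q hq => h q (by simp [hq]))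

-- ===== VERDICT (by name: the statement is the Claim_ definition above) =====
theorem recommend_rewrite_spec : Claim_equal_recommend_rewrite := by
  intro input_text _
  unfold Spec_recommend_rewrite recommend_rewrite recommend_rewrite_alt
  exact foldl_replace_eq_soften _ input_text (by decide)
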